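-- pv_equiv track=rewrite | github.com/SeniorDerpyDev/AdventOfCode | 2019/python/day16.py | part2
-- ===== SOURCE A (Python) =====
-- def part2(signal, offset):
--     lst = (signal * 10_000)[offset:]
--     length = len(lst)
--     for _ in range(100):
--         cumsum = 0
--         for i in range(length - 1, -1, -1):
--             cumsum += lst[i]
--             lst[i] = cumsum % 10
--     return ''.join(str(i) for i in lst[:8])
-- ===== SOURCE B (Python) =====
-- def _comb_small(n, k):
--     # n choose k for 0 <= n, k < 5 (exact; 0 when k > n)
--     r = 1
--     for t in range(k):
--         r = r * (n - t) // (t + 1)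
--     return r
--
--
-- _T2 = [[_comb_small(n, k) for k in range(2)] for n in range(2)]
-- _T5 = [[_comb_small(n, k) for k in range(5)] for n in range(5)]
--
--
-- def _lucas(n, k, p, tbl):
--     # C(n, k) mod p for a prime p, by Lucas's theorem (tbl = binomials below p)
--     r = 1
--     while k and r:
--         r = r * tbl[n % p][k % p] % p
--         n //= p
--         k //= p
--     return r
--
--
-- def _weight(d):
--     # C(99 + d, d) mod 10, CRT-combined from Lucas mod 2 and mod 5
--     return (5 * _lucas(99 + d, d, 2, _T2) + 6 * _lucas(99 + d, d, 5, _T5)) % 10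
--
--
-- def part2(sig, offset):
--     lst = (sig * 10_000)[offset:]
--     length = len(lst)
--     # after 100 rounds of suffix-cumsum mod 10, position i holds
--     # sum_d C(99+d, d) * lst[i+d] (mod 10); compute just the 8 needed digits
--     weights = [_weight(d) for d in range(length)]
--     digits = []
--     for i in range(min(8, length)):
--         total = sum(w * v for w, v in zip(weights, lst[i:]))
--         digits.append(str(total % 10))
--     return ''.join(digits)
-- ===== Notes on version B (the rewrite author's own statement) =====
-- stated objective: faster
-- what changed: Instead of simulating 100 in-place suffix-cumsum-mod-10 passes over the whole list, B computes only the 8 requested digits directly from the closed form value[i] = sum_d C(99+d,d)*lst[i+d] mod 10, obtaining each binomial coefficient mod 10 in O(log d) via Lucas's theorem mod 2 and mod 5 combined by CRT.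
import Mathlib
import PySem

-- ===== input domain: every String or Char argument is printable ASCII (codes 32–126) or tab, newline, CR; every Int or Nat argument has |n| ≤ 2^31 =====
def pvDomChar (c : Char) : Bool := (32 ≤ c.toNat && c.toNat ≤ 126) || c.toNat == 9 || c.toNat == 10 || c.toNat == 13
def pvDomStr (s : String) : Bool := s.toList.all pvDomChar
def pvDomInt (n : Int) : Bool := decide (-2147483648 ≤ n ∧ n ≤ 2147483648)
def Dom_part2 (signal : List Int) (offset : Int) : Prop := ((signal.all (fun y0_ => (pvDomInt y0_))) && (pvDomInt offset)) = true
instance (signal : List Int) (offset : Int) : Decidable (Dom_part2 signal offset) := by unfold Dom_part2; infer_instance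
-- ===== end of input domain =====

-- B replaces A's 100 in-place suffix-cumsum passes by a closed form: after 100 rounds
-- position i holds ∑_d C(99+d,d)·lst[i+d] (mod 10); the binomials mod 10 come from
-- Lucas's theorem mod 2 and mod 5, and only the 8 needed digits are computed (faster).

-- ===== PORT A =====
def part2 (signal : List Int) (offset : Int) : String :=
  let lst := (PySem.List.slice (PySem.List.pyRepeat signal 10000) (some offset) none).toArray
  let length : Int := (lst.size : Int)
  let final := (PySem.List.pyRange 0 100 1).foldl (fun arr _ =>
      ((PySem.List.pyRange (length - 1) (-1) (-1)).foldl
        (fun (st : Array Int × Int) i =>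
          match st with
          | (arr, cumsum) =>
            let cumsum := cumsum + arr.getD i.toNat 0
            (arr.setIfInBounds i.toNat (PySem.Int.mod cumsum 10), cumsum))
        (arr, 0)).1) lst
  PySem.Str.join "" ((PySem.List.slice final.toList none (some 8)).map (fun i => PySem.Int.toStr i))

-- ===== PORT B =====
-- Source B's _comb_small: n choose k for n, k < 5 by the exact multiplicative formula
def combSmall (n k : Nat) : Nat :=
  (List.range k).foldl (fun r t => r * (n - t) / (t + 1)) 1

-- Source B's _T2 / _T5 tables of binomials below the prime
def lucasT2 : List (List Nat) := (List.range 2).map (fun n => (List.range 2).map (fun k => combSmall n k))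
def lucasT5 : List (List Nat) := (List.range 5).map (fun n => (List.range 5).map (fun k => combSmall n k))

-- Source B's _lucas while-loop as a recursion on (n, k, r); the 2 ≤ p guard only
-- establishes termination (both call sites have p = 2 or p = 5)
def lucasAux (p : Nat) (tbl : List (List Nat)) (n k r : Nat) : Nat :=
  if h : 2 ≤ p ∧ k ≠ 0 ∧ r ≠ 0 then
    lucasAux p tbl (n / p) (k / p) (r * ((tbl.getD (n % p) []).getD (k % p) 0) % p)
  else r
termination_by k
decreasing_by exact Nat.div_lt_self (Nat.pos_of_ne_zero h.2.1) h.1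

def lucas (n k p : Nat) (tbl : List (List Nat)) : Nat := lucasAux p tbl n k 1

-- Source B's _weight: C(99+d, d) mod 10, CRT-combined from Lucas mod 2 and mod 5
def weight (d : Nat) : Nat :=
  (5 * lucas (99 + d) d 2 lucasT2 + 6 * lucas (99 + d) d 5 lucasT5) % 10

def part2_alt (signal : List Int) (offset : Int) : String :=
  let lst := PySem.List.slice (PySem.List.pyRepeat signal 10000) (some offset) none
  let length := lst.length
  let weights := (List.range length).map (fun d => (weight d : Int))
  let digits := (List.range (min 8 length)).map (fun (i : Nat) =>
    PySem.Int.toStr (PySem.Int.mod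
      ((weights.zip (PySem.List.slice lst (some (i : Int)) none)).map (fun wv => wv.1 * wv.2)).sum 10))
  PySem.Str.join "" digits

-- ===== PRECONDITION & SPEC =====
def Spec_part2 (signal : List Int) (offset : Int) (out : String) : Prop := out = part2_alt signal offset
instance (signal : List Int) (offset : Int) (out : String) : Decidable (Spec_part2 signal offset out) := by unfold Spec_part2; infer_instance

-- ===== CLAIM (what is proved, stated in full; the proofs are below) =====
def Claim_equal_part2 : Prop := ∀ (signal : List Int) (offset : Int), Dom_part2 signal offset → Spec_part2 signal offset (part2 signal offset)

-- ===== LEMMAS AND PROOFS =====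

-- A's inner pass (suffix cumulative sum, mod 10 stored) as a structural recursion,
-- with incoming carry c from the already-processed right part
def gcum : List Int → Int → (List Int × Int)
  | [], c => ([], c)
  | x :: xs, c =>
    let r := gcum xs c
    (PySem.Int.mod (x + r.2) 10 :: r.1, x + r.2)

-- one full round of A's inner loop
def rnd (l : List Int) : List Int := (gcum l 0).1

theorem gcum_snd (l : List Int) (c : Int) : (gcum l c).2 = l.sum + c := by
  induction l with
  | nil => simp [gcum]
  | cons x xs ih => simp [gcum, ih]; ring

theorem gcum_length (l : List Int) (c : Int) : (gcum l c).1.length = l.length := by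
  induction l with
  | nil => rfl
  | cons x xs ih => simp [gcum, ih]

theorem gcum_append (ys : List Int) (x : Int) (c : Int) :
    gcum (ys ++ [x]) c
      = ((gcum ys (x + c)).1 ++ [PySem.Int.mod (x + c) 10], (gcum ys (x + c)).2) := by
  induction ys with
  | nil => simp [gcum]
  | cons y ys ih => simp [gcum, ih]

theorem gcum_getD (l : List Int) (c : Int) (i : Nat) (hi : i < l.length) :
    (gcum l c).1.getD i 0 = PySem.Int.mod ((l.drop i).sum + c) 10 := by
  induction l generalizing i with
  | nil => simp at hi
  | cons x xs ih =>
    cases i with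
    | zero => simp [gcum, List.getD, gcum_snd]; ring_nf
    | succ i => simpa [gcum, List.getD] using ih i (by simpa using hi)

theorem inner_fold (pre post : List Int) (c : Int) :
    (PySem.List.pyRange ((pre.length : Int) - 1) (-1) (-1)).foldl
        (fun (st : Array Int × Int) i =>
          match st with
          | (arr, cumsum) =>
            let cumsum := cumsum + arr.getD i.toNat 0
            (arr.setIfInBounds i.toNat (PySem.Int.mod cumsum 10), cumsum))
        ((pre ++ post).toArray, c)
      = (((gcum pre c).1 ++ post).toArray, (gcum pre c).2) := by
  induction pre using List.reverseRecOn generalizing post c with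
  | nil =>
    rw [PySem.List.pyRange_neg_one_eq_nil (by norm_num)]
    simp [gcum]
  | append_singleton ys x ih =>
    have hlen : (((ys ++ [x]).length : Int)) - 1 = (ys.length : Int) := by
      simp
    rw [hlen, PySem.List.pyRange_neg_one_cons (by omega)]
    have harr : (ys ++ [x]) ++ post = ys ++ (x :: post) := by simp
    rw [List.foldl_cons]
    have hget : ((ys ++ x :: post).toArray).getD ((ys.length : Int)).toNat 0 = x := by
      have : ((ys.length : Int)).toNat = ys.length := by simp
      rw [this]
      simp [Array.getD]
    have hset : ((ys ++ x :: post).toArray).setIfInBounds ((ys.length : Int)).toNat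
          (PySem.Int.mod (c + x) 10)
        = (ys ++ (PySem.Int.mod (c + x) 10) :: post).toArray := by
      simp
    rw [harr]
    simp only [hget, hset]
    rw [ih]
    rw [gcum_append]
    simp [add_comm x c]

theorem foldl_const_iterate {α : Type} (m : Nat) (F : α → α) (a : α) :
    (PySem.List.pyRange 0 (m : Int) 1).foldl (fun x _ => F x) a = F^[m] a := by
  induction m with
  | zero => rw [PySem.List.pyRange_one_eq_nil (by norm_num)]; rfl
  | succ m ih =>
    have h1 : ((m : Int)) + 1 = (((m + 1 : Nat)) : Int) := by push_cast; ring
    rw [← h1, PySem.List.pyRange_one_succ_right (by positivity), List.foldl_append,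
      List.foldl_cons, List.foldl_nil, ih, ← Function.iterate_succ_apply' F m a]

theorem rnd_length (l : List Int) : (rnd l).length = l.length := gcum_length l 0

theorem rnd_iterate_length (k : Nat) (l : List Int) : (rnd^[k] l).length = l.length := by
  induction k generalizing l with
  | zero => rfl
  | succ k ih => rw [Function.iterate_succ_apply, ih, rnd_length]

-- the whole 100-round loop of A computes rnd^[100]
theorem rounds_eq (l : List Int) (m : Nat) :
    (PySem.List.pyRange 0 (m : Int) 1).foldl (fun arr _ =>
      ((PySem.List.pyRange (((l.length : Int)) - 1) (-1) (-1)).foldl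
        (fun (st : Array Int × Int) i =>
          match st with
          | (arr, cumsum) =>
            let cumsum := cumsum + arr.getD i.toNat 0
            (arr.setIfInBounds i.toNat (PySem.Int.mod cumsum 10), cumsum))
        (arr, 0)).1) l.toArray
      = (rnd^[m] l).toArray := by
  rw [foldl_const_iterate m _ l.toArray]
  suffices h : ∀ (m : Nat) (l' : List Int), l'.length = l.length →
      (fun arr => ((PySem.List.pyRange (((l.length : Int)) - 1) (-1) (-1)).foldl
        (fun (st : Array Int × Int) i =>
          match st with
          | (arr, cumsum) =>
            let cumsum := cumsum + arr.getD i.toNat 0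
            (arr.setIfInBounds i.toNat (PySem.Int.mod cumsum 10), cumsum))
        (arr, 0)).1)^[m] l'.toArray = (rnd^[m] l').toArray by
    exact h m l rfl
  intro m
  induction m with
  | zero => intro l' _; rfl
  | succ m ih =>
    intro l' hl'
    rw [Function.iterate_succ_apply, Function.iterate_succ_apply]
    have hstep : ((PySem.List.pyRange (((l.length : Int)) - 1) (-1) (-1)).foldl
        (fun (st : Array Int × Int) i =>
          match st with
          | (arr, cumsum) =>
            let cumsum := cumsum + arr.getD i.toNat 0
            (arr.setIfInBounds i.toNat (PySem.Int.mod cumsum 10), cumsum))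
        (l'.toArray, 0)).1 = (rnd l').toArray := by
      have h := inner_fold l' [] 0
      simp only [List.append_nil] at h
      rw [← hl', h]
      simp [rnd]
    simp only [hstep]
    exact ih (rnd l') (by rw [rnd_length, hl'])

-- list sum as an indexed Finset sum
theorem lsum_getD (m : List Int) : m.sum = ∑ j ∈ Finset.range m.length, m.getD j 0 := by
  induction m with
  | nil => simp
  | cons x xs ih =>
    rw [List.sum_cons, List.length_cons, Finset.sum_range_succ']
    simp only [List.getD_cons_succ, List.getD_cons_zero, ← ih]
    ring

theorem drop_sum (l : List Int) (i : Nat) :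
    (l.drop i).sum = ∑ j ∈ Finset.range (l.length - i), l.getD (i + j) 0 := by
  rw [lsum_getD, List.length_drop]
  refine Finset.sum_congr rfl (fun j _ => ?_)
  simp [List.getD, List.getElem?_drop]

-- the triangular double-sum reindexing used in the induction step
theorem sum_tri (M : Nat) (f : Nat → Nat → ZMod 10) :
    ∑ j' ∈ Finset.range M, ∑ j ∈ Finset.range (M - j'), f j' (j' + j)
      = ∑ m ∈ Finset.range M, ∑ j' ∈ Finset.range (m + 1), f j' m := by
  induction M with
  | zero => simp
  | succ M ih =>
    rw [Finset.sum_range_succ, Finset.sum_range_succ]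
    have hsplit : ∀ j' ∈ Finset.range M,
        ∑ j ∈ Finset.range (M + 1 - j'), f j' (j' + j)
          = (∑ j ∈ Finset.range (M - j'), f j' (j' + j)) + f j' M := by
      intro j' hj'
      have hj : j' < M := Finset.mem_range.mp hj'
      have h1 : M + 1 - j' = (M - j') + 1 := by omega
      rw [h1, Finset.sum_range_succ]
      congr 2
      omega
    rw [Finset.sum_congr rfl hsplit, Finset.sum_add_distrib, ih]
    have h2 : M + 1 - M = 1 := by omega
    rw [h2]
    simp [Finset.sum_range_succ]
    ring

-- hockey-stick identity
theorem hockey (k m : Nat) :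
    ∑ d ∈ Finset.range (m + 1), (k + d).choose d = (k + 1 + m).choose m := by
  induction m with
  | zero => simp
  | succ m ih =>
    rw [Finset.sum_range_succ, ih]
    have h1 : k + 1 + (m + 1) = (k + 1 + m) + 1 := by omega
    have h2 : k + (m + 1) = k + 1 + m := by omega
    rw [h1, h2, Nat.choose_succ_succ' (k + 1 + m) m]

theorem castmod (a : Int) : ((PySem.Int.mod a 10 : Int) : ZMod 10) = (a : ZMod 10) := by
  rw [PySem.Int.mod_eq_emod_of_pos (by norm_num : (0:Int) < 10)]
  have h10 : (10 : Int) = ((10 : Nat) : Int) := by norm_num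
  rw [h10]
  exact ZMod.intCast_mod a 10

-- after t+1 rounds, position i holds the binomially weighted suffix sum (mod 10)
theorem char_rounds (l : List Int) (t : Nat) (i : Nat) (hi : i < l.length) :
    (((rnd^[t + 1] l).getD i 0 : Int) : ZMod 10)
      = ∑ j ∈ Finset.range (l.length - i),
          ((t + j).choose j : ZMod 10) * ((l.getD (i + j) 0 : Int) : ZMod 10) := by
  induction t generalizing i with
  | zero =>
    rw [Function.iterate_one]
    have h1 : (rnd l).getD i 0 = PySem.Int.mod ((l.drop i).sum + 0) 10 := gcum_getD l 0 i hi
    rw [h1, add_zero, castmod, drop_sum]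
    push_cast
    refine Finset.sum_congr rfl (fun j _ => ?_)
    simp [Nat.choose_self]
  | succ t ih =>
    have hlen := rnd_iterate_length (t + 1) l
    rw [Function.iterate_succ_apply']
    set m := rnd^[t + 1] l with hm
    have h1 : (rnd m).getD i 0 = PySem.Int.mod ((m.drop i).sum + 0) 10 :=
      gcum_getD m 0 i (by omega)
    rw [h1, add_zero, castmod, drop_sum]
    push_cast
    have h2 : ∀ j' ∈ Finset.range (m.length - i), ((m.getD (i + j') 0 : Int) : ZMod 10)
        = ∑ j ∈ Finset.range ((l.length - i) - j'),
            ((t + (i + (j' + j) - (i + j'))).choose (i + (j' + j) - (i + j')) : ZMod 10)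
              * ((l.getD (i + (j' + j)) 0 : Int) : ZMod 10) := by
      intro j' hj'
      have hj : j' < m.length - i := Finset.mem_range.mp hj'
      have := ih (i + j') (by omega)
      rw [this]
      have hb : l.length - (i + j') = (l.length - i) - j' := by omega
      rw [hb]
      refine Finset.sum_congr rfl (fun j _ => ?_)
      have hjj : i + (j' + j) - (i + j') = j := by omega
      have hix : i + (j' + j) = i + j' + j := by omega
      rw [hjj, hix]
    rw [Finset.sum_congr rfl h2, hlen]
    have h3 : ∑ j' ∈ Finset.range (l.length - i), ∑ j ∈ Finset.range ((l.length - i) - j'),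
          ((t + (i + (j' + j) - (i + j'))).choose (i + (j' + j) - (i + j')) : ZMod 10)
            * ((l.getD (i + (j' + j)) 0 : Int) : ZMod 10)
        = ∑ mm ∈ Finset.range (l.length - i), ∑ j' ∈ Finset.range (mm + 1),
            ((t + (i + mm - (i + j'))).choose (i + mm - (i + j')) : ZMod 10)
              * ((l.getD (i + mm) 0 : Int) : ZMod 10) :=
      sum_tri (l.length - i)
        (fun j' mm => ((t + (i + mm - (i + j'))).choose (i + mm - (i + j')) : ZMod 10)
          * ((l.getD (i + mm) 0 : Int) : ZMod 10))
    rw [h3]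
    refine Finset.sum_congr rfl (fun mm hmm => ?_)
    rw [← Finset.sum_mul]
    congr 1
    have hco : ∀ j' ∈ Finset.range (mm + 1),
        ((t + (i + mm - (i + j'))).choose (i + mm - (i + j')) : ZMod 10)
          = ((t + (mm - j')).choose (mm - j') : ZMod 10) := by
      intro j' _
      congr 2 <;> omega
    rw [Finset.sum_congr rfl hco]
    have hr := Finset.sum_range_reflect (fun d => ((t + d).choose d : ZMod 10)) (mm + 1)
    simp only [Nat.add_sub_cancel] at hr
    calc ∑ j' ∈ Finset.range (mm + 1), ((t + (mm - j')).choose (mm - j') : ZMod 10)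
        = ∑ d ∈ Finset.range (mm + 1), ((t + d).choose d : ZMod 10) := by
          rw [← hr]
      _ = ((t + 1 + mm).choose mm : ZMod 10) := by
          rw [← Nat.cast_sum, hockey t mm]

theorem rnd_bounds (l : List Int) (i : Nat) (hi : i < l.length) :
    0 ≤ (rnd l).getD i 0 ∧ (rnd l).getD i 0 < 10 := by
  have h1 : (rnd l).getD i 0 = PySem.Int.mod ((l.drop i).sum + 0) 10 := gcum_getD l 0 i hi
  rw [h1]
  exact ⟨PySem.Int.mod_nonneg _ (by norm_num), PySem.Int.mod_lt _ (by norm_num)⟩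

-- ===== B side =====

theorem lucasT2_spec : ∀ a : Nat, a < 2 → ∀ b : Nat, b < 2 → ((lucasT2.getD a []).getD b 0) = a.choose b := by
  decide

theorem lucasT5_spec : ∀ a : Nat, a < 5 → ∀ b : Nat, b < 5 → ((lucasT5.getD a []).getD b 0) = a.choose b := by
  decide

theorem lucasAux_eq (p : Nat) (hp : p.Prime) (tbl : List (List Nat))
    (htbl : ∀ a : Nat, a < p → ∀ b : Nat, b < p → ((tbl.getD a []).getD b 0) = a.choose b)
    (n k r : Nat) (hr : r < p) :
    lucasAux p tbl n k r = (r * n.choose k) % p := by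
  haveI : Fact p.Prime := ⟨hp⟩
  induction k using Nat.strong_induction_on generalizing n r with
  | _ k ihk =>
    rw [lucasAux]
    split
    · rename_i hcond
      obtain ⟨hp2, hk0, hr0⟩ := hcond
      rw [ihk (k / p) (Nat.div_lt_self (Nat.pos_of_ne_zero hk0) hp2) (n / p)
          (r * ((tbl.getD (n % p) []).getD (k % p) 0) % p) (Nat.mod_lt _ (by omega))]
      rw [htbl (n % p) (Nat.mod_lt _ (by omega)) (k % p) (Nat.mod_lt _ (by omega))]
      rw [Nat.mod_mul_mod]
      rw [mul_assoc]
      have hL : n.choose k ≡ (n % p).choose (k % p) * (n / p).choose (k / p) [MOD p] :=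
        Choose.choose_modEq_choose_mod_mul_choose_div_nat
      exact (Nat.ModEq.mul_left r hL).symm
    · rename_i hcond
      have hp2 : 2 ≤ p := hp.two_le
      have : k = 0 ∨ r = 0 := by tauto
      rcases this with h | h
      · subst h
        rw [Nat.choose_zero_right, mul_one, Nat.mod_eq_of_lt hr]
      · subst h
        simp

theorem lucas_eq (n k : Nat) (p : Nat) (hp : p.Prime) (tbl : List (List Nat))
    (htbl : ∀ a : Nat, a < p → ∀ b : Nat, b < p → ((tbl.getD a []).getD b 0) = a.choose b) :
    lucas n k p tbl = n.choose k % p := by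
  rw [lucas, lucasAux_eq p hp tbl htbl n k 1 hp.one_lt, one_mul]

theorem weight_eq (d : Nat) : weight d = (99 + d).choose d % 10 := by
  rw [weight, lucas_eq (99 + d) d 2 Nat.prime_two lucasT2 lucasT2_spec,
    lucas_eq (99 + d) d 5 Nat.prime_five lucasT5 lucasT5_spec]
  omega

-- B's zip-sum, indexed
theorem zipsum (xs ys : List Int) :
    ((xs.zip ys).map (fun wv => wv.1 * wv.2)).sum
      = ∑ j ∈ Finset.range (min xs.length ys.length), xs.getD j 0 * ys.getD j 0 := by
  induction xs generalizing ys with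
  | nil => simp
  | cons x xs ih =>
    cases ys with
    | nil => simp
    | cons y ys =>
      rw [List.zip_cons_cons, List.map_cons, List.sum_cons, ih ys]
      have hmin : min (x :: xs).length (y :: ys).length = min xs.length ys.length + 1 := by
        simp only [List.length_cons, Nat.min_def]
        split <;> split <;> omega
      rw [hmin, Finset.sum_range_succ']
      simp only [List.getD_cons_succ, List.getD_cons_zero]
      ring

theorem wcast (j : Nat) : ((weight j : Int) : ZMod 10) = ((99 + j).choose j : ZMod 10) := by
  rw [weight_eq j, Int.cast_natCast, ZMod.natCast_mod]

-- the A-digit at position i equals B's weighted-sum digit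
theorem key_digit (l : List Int) (i : Nat) (hi : i < l.length) :
    (rnd^[100] l).getD i 0
      = PySem.Int.mod (((((List.range l.length).map (fun d => (weight d : Int))).zip
          (l.drop i)).map (fun wv => wv.1 * wv.2)).sum) 10 := by
  set S : Int := ((((List.range l.length).map (fun d => (weight d : Int))).zip
      (l.drop i)).map (fun wv => wv.1 * wv.2)).sum with hS
  have hzip : S = ∑ j ∈ Finset.range (l.length - i), (weight j : Int) * l.getD (i + j) 0 := by
    rw [hS, zipsum]
    have hm : min ((List.range l.length).map (fun d => (weight d : Int))).length
        (l.drop i).length = l.length - i := by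
      simp
    rw [hm]
    refine Finset.sum_congr rfl (fun j hj => ?_)
    have hjlt : j < l.length - i := Finset.mem_range.mp hj
    rw [PySem.List.getD_map_range _ _ _ _ (by omega)]
    congr 1
    simp [List.getD, List.getElem?_drop]
  have hA : (((rnd^[100] l).getD i 0 : Int) : ZMod 10)
      = ∑ j ∈ Finset.range (l.length - i),
          ((99 + j).choose j : ZMod 10) * ((l.getD (i + j) 0 : Int) : ZMod 10) := by
    simpa using char_rounds l 99 i hi
  have hB : ((PySem.Int.mod S 10 : Int) : ZMod 10)
      = ∑ j ∈ Finset.range (l.length - i),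
          ((99 + j).choose j : ZMod 10) * ((l.getD (i + j) 0 : Int) : ZMod 10) := by
    rw [castmod, hzip, Int.cast_sum]
    refine Finset.sum_congr rfl (fun j hj => ?_)
    rw [Int.cast_mul, wcast j]
  have hAb : 0 ≤ (rnd^[100] l).getD i 0 ∧ (rnd^[100] l).getD i 0 < 10 := by
    have h := rnd_bounds (rnd^[99] l) i (by rw [rnd_iterate_length]; exact hi)
    rwa [← Function.iterate_succ_apply' rnd 99 l] at h
  have hBb : 0 ≤ PySem.Int.mod S 10 ∧ PySem.Int.mod S 10 < 10 :=
    ⟨PySem.Int.mod_nonneg _ (by norm_num), PySem.Int.mod_lt _ (by norm_num)⟩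
  have hcast : (((rnd^[100] l).getD i 0 : Int) : ZMod 10)
      = ((PySem.Int.mod S 10 : Int) : ZMod 10) := by rw [hA, hB]
  rw [ZMod.intCast_eq_intCast_iff] at hcast
  have hmods : (rnd^[100] l).getD i 0 % 10 = PySem.Int.mod S 10 % 10 := hcast
  omega

-- the first 8 digits of A's final state, as B computes them
theorem take8_eq (l : List Int) :
    (rnd^[100] l).take 8
      = (List.range (min 8 l.length)).map (fun i =>
          PySem.Int.mod (((((List.range l.length).map (fun d => (weight d : Int))).zip
            (l.drop i)).map (fun wv => wv.1 * wv.2)).sum) 10) := by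
  apply List.ext_getElem
  · rw [List.length_take, rnd_iterate_length, List.length_map, List.length_range]
  · intro i h1 h2
    simp only [List.getElem_take, List.getElem_map, List.getElem_range]
    have hiN : i < l.length := by
      rw [List.length_map, List.length_range] at h2
      omega
    have hlt : i < (rnd^[100] l).length := by rw [rnd_iterate_length]; exact hiN
    rw [← List.getD_eq_getElem (rnd^[100] l) 0 hlt, key_digit l i hiN]

-- ===== VERDICT (by name: the statement is the Claim_ definition above) =====
theorem part2_spec : Claim_equal_part2 := by
  unfold Claim_equal_part2
  intro signal offset _
  unfold Spec_part2
  simp only [part2, part2_alt]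
  set l := PySem.List.slice (PySem.List.pyRepeat signal 10000) (some offset) none with hl
  simp only [List.size_toArray]
  have h100 : (100 : Int) = ((100 : Nat) : Int) := by norm_num
  rw [h100, rounds_eq l 100]
  have h8 : PySem.List.slice (rnd^[100] l) none (some 8) = (rnd^[100] l).take 8 := by
    rw [PySem.List.slice_to _ (by norm_num)]
    rfl
  rw [h8, take8_eq]
  simp only [PySem.List.slice_from_natCast]
  rw [List.map_map]
  rfl
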